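-- pv_equiv track=rewrite | github.com/Koraavo/Jetedu-final-files | Calculator/Final_Calc-kinjal.py | handling_initial_inputs
-- ===== SOURCE A (Python) =====
-- def handling_initial_inputs(user_input) -> str:
--     """Handling user-inputs with + and -"""
--     out = ''.join(user_input.split())
--     if '**' in out:
--         return 'Invalid expression'
--     else:
--         while '++' in out:
--             out = out.replace('++', '+')
--         while '---' in out:
--             out = out.replace('---', '-')
--         while '--' in out:
--             out = out.replace('--', '+')
--         return out
-- ===== SOURCE B (Python) =====
-- def handling_initial_inputs(user_input) -> str:
--     """Handling user-inputs with + and -"""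
--     out = ''.join(user_input.split())
--     if '**' in out:
--         return 'Invalid expression'
--     res = []
--     i, n = 0, len(out)
--     while i < n:
--         c = out[i]
--         if c == '+' or c == '-':
--             j = i + 1
--             while j < n and out[j] == c:
--                 j += 1
--             if c == '+' or (j - i) % 2 == 0:
--                 res.append('+')
--             else:
--                 res.append('-')
--             i = j
--         else:
--             res.append(c)
--             i += 1
--     return ''.join(res)
-- ===== Notes on version B (the rewrite author's own statement) =====
-- stated objective: alternative
-- what changed: Replaces A's three repeated whole-string replace loops (rescanning until no doubled plus, tripled minus, doubled minus remains) by a single linear pass that emits each maximal sign run as one output sign (plus runs collapse to one plus, minus runs to one sign by run-length parity) and copies every other character unchanged.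
import Mathlib
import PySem

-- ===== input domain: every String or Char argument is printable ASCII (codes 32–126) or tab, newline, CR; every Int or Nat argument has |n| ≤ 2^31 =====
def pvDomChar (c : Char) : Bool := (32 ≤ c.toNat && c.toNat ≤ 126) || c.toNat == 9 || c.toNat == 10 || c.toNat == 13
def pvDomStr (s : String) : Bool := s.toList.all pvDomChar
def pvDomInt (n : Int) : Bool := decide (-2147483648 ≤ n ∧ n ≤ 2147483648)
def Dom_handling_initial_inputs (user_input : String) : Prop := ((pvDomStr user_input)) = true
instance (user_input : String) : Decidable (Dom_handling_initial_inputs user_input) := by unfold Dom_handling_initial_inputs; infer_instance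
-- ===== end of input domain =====

-- B replaces A's repeated whole-string replace('++'/'---'/'--') passes by one linear pass that
-- emits each maximal '+'/'-' run as a single sign (minus runs by parity); same return value.

-- ===== PORT A =====
-- A-side helpers: `repl` is the structural form of one Python str.replace pass; the lemmas
-- below it are cited by the loops' decreasing_by (each replace of a present pattern shortens the string).
-- generic structural characterization of Python's str.replace (one pass)
def repl (old new : List Char) : List Char → List Char
  | [] => []
  | c :: t =>
    if old.isPrefixOf (c :: t) then new ++ repl old new (t.drop (old.length - 1))
    else c :: repl old new t
  termination_by l => l.length
  decreasing_by
  · simp only [List.length_cons]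
    have := List.length_drop (i := old.length - 1) (l := t)
    omega
  · simp

theorem go_eq (old new : List Char) (hold : old ≠ []) :
    ∀ (fuel : Nat) (l acc : List Char), l.length ≤ fuel →
      PySem.Chars.replace.go old new fuel l acc = acc.reverse ++ repl old new l := by
  intro fuel
  induction fuel with
  | zero =>
    intro l acc h
    have : l = [] := by cases l <;> simp_all
    subst this
    rw [PySem.Chars.replace.go, repl]
  | succ n ih =>
    intro l acc h
    match l with
    | [] => simp [PySem.Chars.replace.go, repl]
    | c :: t =>
      rw [PySem.Chars.replace.go]
      obtain ⟨o, os, rfl⟩ : ∃ o os, old = o :: os := by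
        cases old with
        | nil => exact absurd rfl hold
        | cons o os => exact ⟨o, os, rfl⟩
      have hlen : t.length ≤ n := by simp at h; omega
      by_cases hp : (o :: os).isPrefixOf (c :: t)
      · simp only [hp, if_true]
        rw [ih _ _ (by
          have := List.length_drop (i := (o::os).length) (l := (c::t))
          simp only [List.length_cons] at this ⊢
          omega)]
        rw [repl, if_pos hp]
        simp [List.drop_succ_cons]
      · simp only [hp]
        rw [ih _ _ hlen]
        rw [repl, if_neg hp]
        simp

theorem replace_eq_repl (l old new : List Char) (hold : old ≠ []) :
    PySem.Chars.replace l old new = repl old new l := by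
  rw [PySem.Chars.replace]
  simp only [List.isEmpty_iff, hold, if_false]
  · rw [go_eq old new hold l.length l [] le_rfl]
    simp

theorem repl_length_le (old new : List Char) (h : new.length ≤ old.length) :
    ∀ l, (repl old new l).length ≤ l.length := by
  intro l
  induction l using repl.induct old with
  | case1 => simp [repl]
  | case2 c t hp ih =>
    rw [repl, if_pos hp]
    have hple : old.length ≤ t.length + 1 := by
      have := (List.isPrefixOf_iff_prefix.mp hp).length_le
      simpa using this
    have := List.length_drop (i := old.length - 1) (l := t)
    simp only [List.length_append, List.length_cons]
    omega
  | case3 c t hp ih =>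
    rw [repl, if_neg hp]
    simp only [List.length_cons]
    omega

theorem repl_length_lt (old new : List Char) (h : new.length < old.length)
    (l : List Char) (hin : old <:+: l) : (repl old new l).length < l.length := by
  induction l using repl.induct old with
  | case1 =>
    have : old = [] := List.sublist_nil.mp hin.sublist
    simp [this] at h
  | case2 c t hp ih =>
    rw [repl, if_pos hp]
    have hple : old.length ≤ t.length + 1 := by
      have := (List.isPrefixOf_iff_prefix.mp hp).length_le
      simpa using this
    have hle := repl_length_le old new (le_of_lt h) (t.drop (old.length - 1))
    have := List.length_drop (i := old.length - 1) (l := t)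
    simp only [List.length_append, List.length_cons]
    omega
  | case3 c t hp ih =>
    rw [repl, if_neg hp]
    have : old <:+: t := by
      rcases List.infix_cons_iff.mp hin with h1 | h2
      · exact absurd (List.isPrefixOf_iff_prefix.mpr h1) hp
      · exact h2
    simp only [List.length_cons]
    exact Nat.succ_lt_succ (ih this)

-- while '++' in out: out = out.replace('++','+')
def loop1 (l : List Char) : List Char :=
  if h : PySem.Chars.isIn ['+','+'] l = true then
    loop1 (PySem.Chars.replace l ['+','+'] ['+'])
  else l
  termination_by l.length
  decreasing_by
    rw [replace_eq_repl l ['+','+'] ['+'] (by simp)]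
    exact repl_length_lt _ _ (by simp) l ((PySem.Chars.isIn_iff_infix _ _).mp h)

def loop2 (l : List Char) : List Char :=
  if h : PySem.Chars.isIn ['-','-','-'] l = true then
    loop2 (PySem.Chars.replace l ['-','-','-'] ['-'])
  else l
  termination_by l.length
  decreasing_by
    rw [replace_eq_repl l ['-','-','-'] ['-'] (by simp)]
    exact repl_length_lt _ _ (by simp) l ((PySem.Chars.isIn_iff_infix _ _).mp h)

def loop3 (l : List Char) : List Char :=
  if h : PySem.Chars.isIn ['-','-'] l = true then
    loop3 (PySem.Chars.replace l ['-','-'] ['+'])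
  else l
  termination_by l.length
  decreasing_by
    rw [replace_eq_repl l ['-','-'] ['+'] (by simp)]
    exact repl_length_lt _ _ (by simp) l ((PySem.Chars.isIn_iff_infix _ _).mp h)

def handling_initial_inputs (user_input : String) : String :=
  let out := PySem.Str.join "" (PySem.Str.split₀ user_input)
  if PySem.Str.isIn "**" out then "Invalid expression"
  else String.mk (loop3 (loop2 (loop1 out.toList)))

-- ===== PORT B =====

-- B: single pass over maximal sign runs
def bgo : List Char → List Char
  | [] => []
  | c :: t =>
    if c = '+' ∨ c = '-' then
      (if c = '+' ∨ ((t.takeWhile (· == c)).length + 1) % 2 = 0 then '+' else '-')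
        :: bgo (t.dropWhile (· == c))
    else c :: bgo t
  termination_by l => l.length
  decreasing_by
  · simp only [List.length_cons]
    have := List.length_dropWhile_le (· == c) t
    omega
  · simp

def handling_initial_inputs_alt (user_input : String) : String :=
  let out := PySem.Str.join "" (PySem.Str.split₀ user_input)
  if PySem.Str.isIn "**" out then "Invalid expression"
  else String.mk (bgo out.toList)

-- ===== PRECONDITION & SPEC =====
def Spec_handling_initial_inputs (user_input : String) (out : String) : Prop := out = handling_initial_inputs_alt user_input
instance (user_input : String) (out : String) : Decidable (Spec_handling_initial_inputs user_input out) := by unfold Spec_handling_initial_inputs; infer_instance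

-- ===== CLAIM (what is proved, stated in full; the proofs are below) =====
def Claim_equal_handling_initial_inputs : Prop := ∀ (user_input : String), Dom_handling_initial_inputs user_input → Spec_handling_initial_inputs user_input (handling_initial_inputs user_input)

-- ===== LEMMAS AND PROOFS =====

-- phase-specific unfoldings of repl

theorem repl1_pp (t : List Char) :
    repl ['+','+'] ['+'] ('+' :: '+' :: t) = '+' :: repl ['+','+'] ['+'] t := by
  rw [repl]; simp [List.isPrefixOf]

theorem repl1_cons (c : Char) (t : List Char) (h : c ≠ '+') :
    repl ['+','+'] ['+'] (c :: t) = c :: repl ['+','+'] ['+'] t := by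
  rw [repl]; simp [List.isPrefixOf, Ne.symm h]

theorem repl1_one (t : List Char) (h : t.head? ≠ some '+') :
    repl ['+','+'] ['+'] ('+' :: t) = '+' :: repl ['+','+'] ['+'] t := by
  rw [repl]
  cases t with
  | nil => simp [List.isPrefixOf]
  | cons d v =>
    have hd : d ≠ '+' := by simpa using h
    simp [List.isPrefixOf, Ne.symm hd]

theorem repl2_mmm (t : List Char) :
    repl ['-','-','-'] ['-'] ('-' :: '-' :: '-' :: t) = '-' :: repl ['-','-','-'] ['-'] t := by
  rw [repl]; simp [List.isPrefixOf]

theorem repl2_cons (c : Char) (t : List Char) (h : c ≠ '-') :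
    repl ['-','-','-'] ['-'] (c :: t) = c :: repl ['-','-','-'] ['-'] t := by
  rw [repl]; simp [List.isPrefixOf, Ne.symm h]

theorem repl2_m (t : List Char) (h : ¬ (t.head? = some '-' ∧ t.tail.head? = some '-')) :
    repl ['-','-','-'] ['-'] ('-' :: t) = '-' :: repl ['-','-','-'] ['-'] t := by
  rw [repl]
  cases t with
  | nil => simp [List.isPrefixOf]
  | cons d v =>
    cases v with
    | nil =>
      by_cases hd : d = '-' <;> simp [List.isPrefixOf, hd]
    | cons e w =>
      simp only [List.head?_cons, List.tail_cons, Option.some.injEq] at h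
      by_cases hd : d = '-'
      · have he : e ≠ '-' := fun hh => h ⟨hd, hh⟩
        simp [List.isPrefixOf, hd, Ne.symm he]
      · simp [List.isPrefixOf, Ne.symm hd]

theorem repl3_mm (t : List Char) :
    repl ['-','-'] ['+'] ('-' :: '-' :: t) = '+' :: repl ['-','-'] ['+'] t := by
  rw [repl]; simp [List.isPrefixOf]

theorem repl3_cons (c : Char) (t : List Char) (h : c ≠ '-') :
    repl ['-','-'] ['+'] (c :: t) = c :: repl ['-','-'] ['+'] t := by
  rw [repl]; simp [List.isPrefixOf, Ne.symm h]

theorem repl3_m (t : List Char) (h : t.head? ≠ some '-') :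
    repl ['-','-'] ['+'] ('-' :: t) = '-' :: repl ['-','-'] ['+'] t := by
  rw [repl]
  cases t with
  | nil => simp [List.isPrefixOf]
  | cons d v =>
    have hd : d ≠ '-' := by simpa using h
    simp [List.isPrefixOf, Ne.symm hd]

def g1 (m : Nat) : List Char := if m = 0 then [] else ['+']

def go1 : Nat → List Char → List Char
  | m, [] => g1 m
  | m, c :: t => if c = '+' then go1 (m+1) t else g1 m ++ c :: go1 0 t

def g2 (m : Nat) : List Char := if m = 0 then [] else if m % 2 = 0 then ['-','-'] else ['-']

def go2 : Nat → List Char → List Char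
  | m, [] => g2 m
  | m, c :: t => if c = '-' then go2 (m+1) t else g2 m ++ c :: go2 0 t

theorem go1_pos : ∀ (t : List Char) (m : Nat), 1 ≤ m →
    go1 m t = '+' :: go1 0 (t.dropWhile (· == '+')) := by
  intro t
  induction t with
  | nil => intro m hm; simp [go1, g1, Nat.pos_iff_ne_zero.mp hm]
  | cons c t ih =>
    intro m hm
    by_cases hc : c = '+'
    · subst hc
      rw [go1, if_pos rfl, List.dropWhile_cons_of_pos (by simp)]
      exact ih (m+1) (by omega)
    · rw [go1, if_neg hc, List.dropWhile_cons_of_neg (by simp [hc])]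
      rw [show go1 0 (c :: t) = g1 0 ++ c :: go1 0 t from by rw [go1, if_neg hc]]
      simp [g1, Nat.pos_iff_ne_zero.mp hm]

theorem K1g : ∀ (t : List Char) (m : Nat), go1 m (repl ['+','+'] ['+'] t) = go1 m t := by
  intro t
  induction t using repl.induct (old := ['+','+']) with
  | case1 => intro m; rw [repl]
  | case2 c t hp ih =>
    intro m
    rcases List.isPrefixOf_iff_prefix.mp hp with ⟨s, hs⟩
    simp only [List.cons_append, List.nil_append] at hs
    injection hs with h1 h2
    subst h1
    subst h2
    simp only [List.length_cons, List.length_nil] at ih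
    have ih' : ∀ m, go1 m (repl ['+','+'] ['+'] s) = go1 m s := by
      intro m; have := ih m; simpa using this
    rw [repl1_pp, go1, if_pos rfl]
    rw [show go1 m ('+' :: '+' :: s) = go1 (m+2) s from by
      rw [go1, if_pos rfl, go1, if_pos rfl]]
    rw [ih' (m+1), go1_pos s (m+1) (by omega), go1_pos s (m+2) (by omega)]
  | case3 c t hp ih =>
    intro m
    by_cases hc : c = '+'
    · subst hc
      have ht : t.head? ≠ some '+' := by
        intro hh
        cases t with
        | nil => simp at hh
        | cons d v =>
          simp at hh
          subst hh
          exact hp (by simp [List.isPrefixOf])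
      rw [repl1_one t ht, go1, if_pos rfl, go1, if_pos rfl]
      exact ih (m+1)
    · rw [repl1_cons c t hc, go1, if_neg hc, go1, if_neg hc, ih 0]

theorem go2_parity : ∀ (t : List Char) (m : Nat), 1 ≤ m → go2 (m+2) t = go2 m t := by
  intro t
  induction t with
  | nil =>
    intro m hm
    have h2 : (m+2) % 2 = m % 2 := by omega
    simp [go2, g2, Nat.pos_iff_ne_zero.mp hm, h2]
  | cons c t ih =>
    intro m hm
    by_cases hc : c = '-'
    · subst hc
      rw [go2, if_pos rfl, go2, if_pos rfl]
      exact ih (m+1) (by omega)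
    · rw [go2, if_neg hc, go2, if_neg hc]
      have h2 : (m+2) % 2 = m % 2 := by omega
      simp [g2, Nat.pos_iff_ne_zero.mp hm, h2]

theorem K2g : ∀ (t : List Char) (m : Nat), go2 m (repl ['-','-','-'] ['-'] t) = go2 m t := by
  intro t
  induction t using repl.induct (old := ['-','-','-']) with
  | case1 => intro m; rw [repl]
  | case2 c t hp ih =>
    intro m
    rcases List.isPrefixOf_iff_prefix.mp hp with ⟨s, hs⟩
    simp only [List.cons_append, List.nil_append] at hs
    injection hs with h1 h2
    subst h1
    subst h2
    simp only [List.length_cons, List.length_nil] at ih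
    have ih' : ∀ m, go2 m (repl ['-','-','-'] ['-'] s) = go2 m s := by
      intro m; have := ih m; simpa using this
    rw [repl2_mmm, go2, if_pos rfl]
    rw [show go2 m ('-' :: '-' :: '-' :: s) = go2 (m+3) s from by
      rw [go2, if_pos rfl, go2, if_pos rfl, go2, if_pos rfl]]
    rw [ih' (m+1)]
    exact (go2_parity s (m+1) (by omega)).symm
  | case3 c t hp ih =>
    intro m
    by_cases hc : c = '-'
    · subst hc
      have ht : ¬ (t.head? = some '-' ∧ t.tail.head? = some '-') := by
        rintro ⟨h1, h2⟩
        cases t with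
        | nil => simp at h1
        | cons d v =>
          simp at h1
          subst h1
          cases v with
          | nil => simp at h2
          | cons e w =>
            simp at h2
            subst h2
            exact hp (by simp [List.isPrefixOf])
      rw [repl2_m t ht, go2, if_pos rfl, go2, if_pos rfl]
      exact ih (m+1)
    · rw [repl2_cons c t hc, go2, if_neg hc, go2, if_neg hc, ih 0]

theorem nf1 : ∀ (l : List Char), ¬ ['+','+'] <:+: l → go1 0 l = l := by
  intro l
  induction l with
  | nil => intro _; simp [go1, g1]
  | cons c t ih =>
    intro h
    have ht : ¬ ['+','+'] <:+: t := fun hh => h (List.infix_cons_iff.mpr (Or.inr hh))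
    by_cases hc : c = '+'
    · subst hc
      cases t with
      | nil => simp [go1, g1]
      | cons d v =>
        have hd : d ≠ '+' := by
          intro hh; subst hh
          exact h (List.infix_cons_iff.mpr (Or.inl ⟨v, rfl⟩))
        have hv := ih ht
        rw [go1, if_neg hd, g1] at hv
        simp at hv
        rw [go1, if_pos rfl, go1, if_neg hd]
        simp [g1, hv]
    · rw [go1, if_neg hc]
      simp [g1, ih ht]

theorem nf2 : ∀ (l : List Char), ¬ ['-','-','-'] <:+: l → go2 0 l = l := by
  intro l
  induction l with
  | nil => intro _; simp [go2, g2]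
  | cons c t ih =>
    intro h
    have ht : ¬ ['-','-','-'] <:+: t := fun hh => h (List.infix_cons_iff.mpr (Or.inr hh))
    by_cases hc : c = '-'
    · subst hc
      cases t with
      | nil => simp [go2, g2]
      | cons d v =>
        by_cases hd : d = '-'
        · subst hd
          cases v with
          | nil => simp [go2, g2]
          | cons e w =>
            have he : e ≠ '-' := by
              intro hh; subst hh
              exact h (List.infix_cons_iff.mpr (Or.inl ⟨w, rfl⟩))
            have hv := ih ht
            rw [go2, if_pos rfl, go2, if_neg he, g2] at hv
            simp at hv
            rw [go2, if_pos rfl, go2, if_pos rfl, go2, if_neg he]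
            simp [g2, hv]
        · have hv := ih ht
          rw [go2, if_neg hd, g2] at hv
          simp at hv
          rw [go2, if_pos rfl, go2, if_neg hd]
          simp [g2, hv]
    · rw [go2, if_neg hc]
      simp [g2, ih ht]

theorem loop1_eq : ∀ (l : List Char), loop1 l = go1 0 l := by
  intro l
  induction l using loop1.induct with
  | case1 l h ih =>
    rw [loop1, dif_pos h]
    rw [replace_eq_repl l ['+','+'] ['+'] (by simp)] at ih ⊢
    rw [ih, K1g]
  | case2 l h =>
    rw [loop1, dif_neg h]
    exact (nf1 l ((PySem.Chars.isIn_eq_false_iff _ _).mp (by simpa using h))).symm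

theorem loop2_eq : ∀ (l : List Char), loop2 l = go2 0 l := by
  intro l
  induction l using loop2.induct with
  | case1 l h ih =>
    rw [loop2, dif_pos h]
    rw [replace_eq_repl l ['-','-','-'] ['-'] (by simp)] at ih ⊢
    rw [ih, K2g]
  | case2 l h =>
    rw [loop2, dif_neg h]
    exact (nf2 l ((PySem.Chars.isIn_eq_false_iff _ _).mp (by simpa using h))).symm

theorem loop2_no (l : List Char) : PySem.Chars.isIn ['-','-','-'] (loop2 l) = false := by
  induction l using loop2.induct with
  | case1 l h ih => rw [loop2, dif_pos h]; exact ih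
  | case2 l h => rw [loop2, dif_neg h]; simpa using h

theorem head3 (l : List Char) (h : (repl ['-','-'] ['+'] l).head? = some '-') :
    l.head? = some '-' := by
  cases l with
  | nil => rw [repl] at h; simp at h
  | cons c t =>
    by_cases hc : c = '-'
    · simp [hc]
    · rw [repl3_cons c t hc] at h
      simp at h
      exact absurd h hc

theorem id3 : ∀ (l : List Char), ¬ ['-','-'] <:+: l → repl ['-','-'] ['+'] l = l := by
  intro l
  induction l with
  | nil => intro _; rw [repl]
  | cons c t ih =>
    intro h
    have ht : ¬ ['-','-'] <:+: t := fun hh => h (List.infix_cons_iff.mpr (Or.inr hh))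
    by_cases hc : c = '-'
    · subst hc
      have hh : t.head? ≠ some '-' := by
        intro hx
        cases t with
        | nil => simp at hx
        | cons d v =>
          simp at hx
          subst hx
          exact h (List.infix_cons_iff.mpr (Or.inl ⟨v, rfl⟩))
      rw [repl3_m t hh, ih ht]
    · rw [repl3_cons c t hc, ih ht]

theorem pres3 : ∀ (l : List Char), ¬ ['-','-','-'] <:+: l →
    ¬ ['-','-'] <:+: repl ['-','-'] ['+'] l := by
  intro l
  induction l using repl.induct (old := ['-','-']) with
  | case1 => intro _ hh; rw [repl] at hh; simp at hh
  | case2 c t hp ih =>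
    intro h3
    rcases List.isPrefixOf_iff_prefix.mp hp with ⟨s, hs⟩
    simp only [List.cons_append, List.nil_append] at hs
    injection hs with h1 h2
    subst h1
    subst h2
    have hs3 : ¬ ['-','-','-'] <:+: s :=
      fun hh => h3 (List.infix_cons_iff.mpr (Or.inr (List.infix_cons_iff.mpr (Or.inr hh))))
    have ih' : ¬ ['-','-'] <:+: repl ['-','-'] ['+'] s := by
      have := ih hs3
      simpa using this
    rw [repl3_mm]
    intro hh
    rcases List.infix_cons_iff.mp hh with hpre | hinf
    · rcases hpre with ⟨u, hu⟩
      simp at hu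
    · exact ih' hinf
  | case3 c t hp ih =>
    intro h3
    have ht3 : ¬ ['-','-','-'] <:+: t := fun hh => h3 (List.infix_cons_iff.mpr (Or.inr hh))
    by_cases hc : c = '-'
    · subst hc
      have hth : t.head? ≠ some '-' := by
        intro hx
        cases t with
        | nil => simp at hx
        | cons d v =>
          simp at hx
          subst hx
          exact hp (by simp [List.isPrefixOf])
      rw [repl3_m t hth]
      intro hh
      rcases List.infix_cons_iff.mp hh with hpre | hinf
      · rcases hpre with ⟨u, hu⟩
        simp only [List.cons_append, List.nil_append] at hu
        injection hu with hx1 hx2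
        have : (repl ['-','-'] ['+'] t).head? = some '-' := by rw [← hx2]; simp
        exact hth (head3 t this)
      · exact ih ht3 hinf
    · rw [repl3_cons c t hc]
      intro hh
      rcases List.infix_cons_iff.mp hh with hpre | hinf
      · rcases hpre with ⟨u, hu⟩
        simp only [List.cons_append, List.nil_append] at hu
        injection hu with hx1 hx2
        exact hc hx1.symm
      · exact ih ht3 hinf

theorem loop3_eq (l : List Char) (h : ¬ ['-','-','-'] <:+: l) :
    loop3 l = repl ['-','-'] ['+'] l := by
  rw [loop3]
  by_cases hin : PySem.Chars.isIn ['-','-'] l = true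
  · rw [dif_pos hin]
    rw [replace_eq_repl l ['-','-'] ['+'] (by simp)]
    have hno : ¬ ['-','-'] <:+: repl ['-','-'] ['+'] l := pres3 l h
    rw [loop3, dif_neg (by simpa using (PySem.Chars.isIn_eq_false_iff _ _).mpr hno)]
  · rw [dif_neg hin]
    exact (id3 l ((PySem.Chars.isIn_eq_false_iff _ _).mp (by simpa using hin))).symm

def eM (m : Nat) : List Char := if m = 0 then [] else if m % 2 = 0 then ['+'] else ['-']

def bgoM : Nat → List Char → List Char
  | m, [] => eM m
  | m, c :: t => if c = '-' then bgoM (m+1) t else eM m ++ bgo (c :: t)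

theorem BM : ∀ (t : List Char) (m : Nat), 1 ≤ m →
    bgoM m t = (if (m + (t.takeWhile (· == '-')).length) % 2 = 0 then '+' else '-')
      :: bgo (t.dropWhile (· == '-')) := by
  intro t
  induction t with
  | nil =>
    intro m hm
    simp only [bgoM, eM, Nat.pos_iff_ne_zero.mp hm, List.takeWhile_nil, List.dropWhile_nil,
      List.length_nil, Nat.add_zero, bgo]
    split_ifs <;> simp_all
  | cons c t ih =>
    intro m hm
    by_cases hc : c = '-'
    · subst hc
      rw [bgoM, if_pos rfl, ih (m+1) (by omega),
        List.takeWhile_cons_of_pos (by simp), List.dropWhile_cons_of_pos (by simp)]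
      simp only [List.length_cons]
      have : m + 1 + (t.takeWhile (· == '-')).length = m + ((t.takeWhile (· == '-')).length + 1) := by omega
      rw [this]
      rfl
    · rw [bgoM, if_neg hc, List.takeWhile_cons_of_neg (by simp [hc]),
        List.dropWhile_cons_of_neg (by simp [hc])]
      simp only [eM, Nat.pos_iff_ne_zero.mp hm, if_false]
      split_ifs <;> simp_all

theorem bgoM0 : ∀ (l : List Char), bgoM 0 l = bgo l := by
  intro l
  cases l with
  | nil => simp [bgoM, bgo, eM]
  | cons c t =>
    by_cases hc : c = '-'
    · subst hc
      rw [bgoM, if_pos rfl, BM t 1 le_rfl]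
      rw [show bgo ('-' :: t) =
          (if (('-':Char) = '+' ∨ ((t.takeWhile (· == '-')).length + 1) % 2 = 0) then '+' else '-')
            :: bgo (t.dropWhile (· == '-')) from by rw [bgo]; simp]
      congr 1
      have : (1 + (t.takeWhile (· == '-')).length) % 2 = ((t.takeWhile (· == '-')).length + 1) % 2 := by omega
      rw [this]
      split_ifs with h1 h2 <;> simp_all
    · rw [bgoM, if_neg hc]
      simp [eM]

theorem repl3_g2_nil (m : Nat) : repl ['-','-'] ['+'] (g2 m) = eM m := by
  rcases Nat.eq_zero_or_pos m with h0 | hp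
  · subst h0; rw [g2, eM]; simp [repl]
  · by_cases h2 : m % 2 = 0
    · rw [g2, eM]
      simp only [Nat.pos_iff_ne_zero.mp hp, if_false, h2, if_true]
      rw [repl3_mm, repl]
    · rw [g2, eM]
      simp only [Nat.pos_iff_ne_zero.mp hp, if_false, h2]
      rw [repl3_m [] (by simp), repl]

theorem repl3_g2_cons (m : Nat) (c : Char) (w : List Char) (hc : c ≠ '-') :
    repl ['-','-'] ['+'] (g2 m ++ c :: w) = eM m ++ c :: repl ['-','-'] ['+'] w := by
  rcases Nat.eq_zero_or_pos m with h0 | hp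
  · subst h0; rw [g2, eM]; simp [repl3_cons c w hc]
  · by_cases h2 : m % 2 = 0
    · rw [g2, eM]
      simp only [Nat.pos_iff_ne_zero.mp hp, if_false, h2, if_true, List.cons_append,
        List.nil_append]
      rw [repl3_mm, repl3_cons c w hc]
    · rw [g2, eM]
      simp only [Nat.pos_iff_ne_zero.mp hp, if_false, h2, List.cons_append, List.nil_append]
      rw [repl3_m (c :: w) (by simp [hc]), repl3_cons c w hc]

theorem COMP : ∀ (n : Nat) (l : List Char), l.length ≤ n → ∀ (m : Nat),
    repl ['-','-'] ['+'] (go2 m (go1 0 l)) = bgoM m l := by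
  intro n
  induction n with
  | zero =>
    intro l hl m
    have : l = [] := by cases l <;> simp_all
    subst this
    rw [go1, g1, if_pos rfl, go2, repl3_g2_nil, bgoM]
  | succ n ih =>
    intro l hl m
    cases l with
    | nil => rw [go1, g1, if_pos rfl, go2, repl3_g2_nil, bgoM]
    | cons c t =>
      have hlt : t.length ≤ n := by simp at hl; omega
      by_cases hm : c = '-'
      · subst hm
        rw [show go1 0 ('-'::t) = '-' :: go1 0 t from by rw [go1, if_neg (by decide)]; simp [g1]]
        rw [show go2 m ('-' :: go1 0 t) = go2 (m+1) (go1 0 t) from by rw [go2, if_pos rfl]]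
        rw [ih t hlt (m+1)]
        rw [bgoM, if_pos rfl]
      · by_cases hp : c = '+'
        · subst hp
          rw [show go1 0 ('+'::t) = go1 1 t from by rw [go1, if_pos rfl]]
          rw [go1_pos t 1 le_rfl]
          rw [show go2 m ('+' :: go1 0 (t.dropWhile (· == '+'))) =
              g2 m ++ '+' :: go2 0 (go1 0 (t.dropWhile (· == '+'))) from by
            rw [go2, if_neg (by decide)]]
          rw [repl3_g2_cons m '+' _ (by decide)]
          rw [ih (t.dropWhile (· == '+')) (le_trans (List.length_dropWhile_le _ _) hlt) 0]
          rw [bgoM0]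
          rw [bgoM, if_neg (by decide)]
          rw [show bgo ('+'::t) = '+' :: bgo (t.dropWhile (· == '+')) from by
            rw [bgo]; simp]
        · rw [show go1 0 (c::t) = c :: go1 0 t from by rw [go1, if_neg hp]; simp [g1]]
          rw [show go2 m (c :: go1 0 t) = g2 m ++ c :: go2 0 (go1 0 t) from by
            rw [go2, if_neg hm]]
          rw [repl3_g2_cons m c _ hm]
          rw [ih t hlt 0, bgoM0]
          rw [bgoM, if_neg hm]
          rw [show bgo (c::t) = c :: bgo t from by rw [bgo]; simp [hp, hm]]

theorem MAIN (l : List Char) : loop3 (loop2 (loop1 l)) = bgo l := by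
  have hno : ¬ ['-','-','-'] <:+: loop2 (loop1 l) :=
    (PySem.Chars.isIn_eq_false_iff _ _).mp (loop2_no (loop1 l))
  rw [loop3_eq _ hno, loop2_eq, loop1_eq, COMP l.length l le_rfl 0, bgoM0]

-- ===== VERDICT (by name: the statement is the Claim_ definition above) =====
theorem handling_initial_inputs_spec : Claim_equal_handling_initial_inputs := by
  intro u _
  unfold Spec_handling_initial_inputs handling_initial_inputs handling_initial_inputs_alt
  by_cases h : PySem.Str.isIn "**" (PySem.Str.join "" (PySem.Str.split₀ u)) = true
  · simp only [h, if_true]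
  · simp only [h, if_false, Bool.false_eq_true]
    exact congrArg String.mk (MAIN _)
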